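-- pv_equiv track=rewrite | github.com/kanyingidickson-dev/Password-Strength-Checker | src/patterns.py | _is_sequence
-- ===== SOURCE A (Python) =====
-- def _is_sequence(s: str) -> bool:
--     if len(s) < 4:
--         return False
--
--     diffs = [ord(s[i + 1]) - ord(s[i]) for i in range(len(s) - 1)]
--     if all(d == 1 for d in diffs):
--         return True
--     if all(d == -1 for d in diffs):
--         return True
--     return False
-- ===== SOURCE B (Python) =====
-- def _is_sequence(s: str) -> bool:
--     if len(s) < 4:
--         return False
--     codes = [ord(c) for c in s]
--     c0 = codes[0]
--     n = len(codes)
--     return codes == list(range(c0, c0 + n)) or codes == list(range(c0, c0 - n, -1))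
-- ===== Notes on version B (the rewrite author's own statement) =====
-- stated objective: idiomatic
-- what changed: B builds the two candidate code sequences with range() and compares them to the string's code list by equality, instead of A's adjacent-difference list scanned twice with all().
import Mathlib
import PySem

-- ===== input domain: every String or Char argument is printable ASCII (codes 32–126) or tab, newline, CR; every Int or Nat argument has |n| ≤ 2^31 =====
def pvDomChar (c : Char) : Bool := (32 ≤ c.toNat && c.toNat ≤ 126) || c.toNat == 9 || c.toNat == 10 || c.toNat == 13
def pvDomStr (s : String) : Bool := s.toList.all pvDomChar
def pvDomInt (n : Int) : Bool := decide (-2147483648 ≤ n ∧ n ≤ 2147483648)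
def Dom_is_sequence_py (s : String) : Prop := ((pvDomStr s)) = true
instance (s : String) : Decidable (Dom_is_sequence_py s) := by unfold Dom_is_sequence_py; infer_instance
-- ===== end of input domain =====

-- B replaces A's adjacent-difference list scanned twice with all() by building the two
-- candidate code sequences with range() and comparing by equality (idiomatic; same cost).

-- ===== PORT A =====
def is_sequence_py (s : String) : Bool :=
  let cs := s.toList
  if cs.length < 4 then false
  else
    let diffs := (PySem.List.pyRange 0 ((cs.length : Int) - 1) 1).map
      (fun i => ((PySem.List.pyGetD cs (i + 1) default).toNat : Int)
                - ((PySem.List.pyGetD cs i default).toNat : Int))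
    if diffs.all (fun d => d == 1) then true
    else if diffs.all (fun d => d == -1) then true
    else false

-- ===== PORT B =====
def is_sequence_py_alt (s : String) : Bool :=
  let cs := s.toList
  if cs.length < 4 then false
  else
    let codes := cs.map (fun c => (c.toNat : Int))
    let c0 := PySem.List.pyGetD codes 0 0
    let n : Int := codes.length
    decide (codes = PySem.List.pyRange c0 (c0 + n) 1)
      || decide (codes = PySem.List.pyRange c0 (c0 - n) (-1))

-- ===== PRECONDITION & SPEC =====
def Spec_is_sequence_py (s : String) (out : Bool) : Prop := out = is_sequence_py_alt s
instance (s : String) (out : Bool) : Decidable (Spec_is_sequence_py s out) := by unfold Spec_is_sequence_py; infer_instance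

-- ===== CLAIM (what is proved, stated in full; the proofs are below) =====
def Claim_equal_is_sequence_py : Prop := ∀ (s : String), Dom_is_sequence_py s → Spec_is_sequence_py s (is_sequence_py s)

-- ===== LEMMAS AND PROOFS =====

-- "every adjacent step is d" over the integer code list
def pvStep (d : Int) (l : List Int) : Prop :=
  ∀ k : Nat, (hk : k + 1 < l.length) → l[k+1]'hk = l[k]'(by omega) + d

-- telescoping: step-d lists are exactly the arithmetic sequences from l[0]
lemma pvStep_getElem (d : Int) (l : List Int) (h : pvStep d l) :
    ∀ k : Nat, (hk : k < l.length) → (h0 : 0 < l.length) → l[k]'hk = l[0]'h0 + d * k := by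
  intro k
  induction k with
  | zero => intro hk h0; simp
  | succ m ih =>
    intro hk h0
    have hm : m + 1 < l.length := hk
    rw [h m hm, ih (by omega) h0]
    push_cast; ring

lemma pvEq_map_range_iff (l : List Int) (g : Nat → Int) (n : Nat) :
    l = (List.range n).map g ↔ (l.length = n ∧ ∀ k : Nat, (hk : k < l.length) → l[k]'hk = g k) := by
  constructor
  · intro heq
    constructor
    · rw [heq]; simp
    · intro k hk
      rw [List.getElem_of_eq heq hk]
      simp
  · rintro ⟨hlen, hval⟩
    apply List.ext_getElem (by simp [hlen])
    intro i h1 h2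
    simpa using hval i h1

lemma pvRange_up_iff (l : List Int) (hne : 0 < l.length) :
    (l = PySem.List.pyRange (l[0]'hne) (l[0]'hne + (l.length : Int)) 1) ↔ pvStep 1 l := by
  rw [PySem.List.pyRange_one]
  have harg : ((l[0]'hne + (l.length : Int)) - l[0]'hne).toNat = l.length := by omega
  rw [harg, pvEq_map_range_iff]
  constructor
  · rintro ⟨-, hval⟩ k hk
    rw [hval (k+1) hk, hval k (by omega)]
    push_cast; ring
  · intro hstep
    refine ⟨rfl, fun k hk => ?_⟩
    rw [pvStep_getElem 1 l hstep k hk hne]; ring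
lemma pvRange_down_iff (l : List Int) (hne : 0 < l.length) :
    (l = PySem.List.pyRange (l[0]'hne) (l[0]'hne - (l.length : Int)) (-1)) ↔ pvStep (-1) l := by
  rw [PySem.List.pyRange_neg_one]
  have harg : ((l[0]'hne) - (l[0]'hne - (l.length : Int))).toNat = l.length := by omega
  rw [harg, pvEq_map_range_iff]
  constructor
  · rintro ⟨-, hval⟩ k hk
    rw [hval (k+1) hk, hval k (by omega)]
    push_cast; ring
  · intro hstep
    refine ⟨rfl, fun k hk => ?_⟩
    rw [pvStep_getElem (-1) l hstep k hk hne]; ring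

-- A's diffs-all-equal-d test, characterised as pvStep d on the code list
lemma pvDiffs_all_iff (cs : List Char) (d : Int) :
    (((PySem.List.pyRange 0 ((cs.length : Int) - 1) 1).map
        (fun i => ((PySem.List.pyGetD cs (i + 1) default).toNat : Int)
                  - ((PySem.List.pyGetD cs i default).toNat : Int))).all
        (fun x => x == d) = true)
      ↔ pvStep d (cs.map (fun c => (c.toNat : Int))) := by
  simp only [List.all_map, List.all_eq_true, Function.comp, PySem.List.mem_pyRange_one,
    beq_iff_eq]
  constructor
  · intro h k hk
    simp only [List.length_map] at hk
    have := h (k : Int) ⟨by omega, by omega⟩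
    rw [PySem.List.pyGetD_eq_getElem cs default (by omega) (by omega),
        PySem.List.pyGetD_eq_getElem cs default (by omega) (by omega)] at this
    have h1 : ((k : Int) + 1).toNat = k + 1 := by omega
    have h2 : ((k : Int)).toNat = k := by omega
    simp only [h1, h2] at this
    simp only [List.getElem_map]
    omega
  · intro h i ⟨hi0, hi1⟩
    have hk : i.toNat + 1 < cs.length := by omega
    have := h i.toNat (by simpa using hk)
    simp only [List.getElem_map] at this
    rw [PySem.List.pyGetD_eq_getElem cs default (by omega) (by omega),
        PySem.List.pyGetD_eq_getElem cs default (by omega) (by omega)]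
    have h1 : (i + 1).toNat = i.toNat + 1 := by omega
    simp only [h1]
    omega

lemma pvIf_or (b1 b2 : Bool) :
    (if b1 = true then true else if b2 = true then true else false) = (b1 || b2) := by
  cases b1 <;> cases b2 <;> rfl

-- ===== VERDICT (by name: the statement is the Claim_ definition above) =====
theorem is_sequence_py_spec : Claim_equal_is_sequence_py := by
  intro s _
  unfold Spec_is_sequence_py is_sequence_py is_sequence_py_alt
  set cs := s.toList with hcs
  by_cases hlen : cs.length < 4
  · simp only [hlen, if_true]
  · simp only [hlen, if_false]
    have hne : 0 < cs.length := by omega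
    set codes := cs.map (fun c => (c.toNat : Int)) with hcodes
    have hne' : 0 < codes.length := by simpa [hcodes] using hne
    have hc0 : PySem.List.pyGetD codes 0 0 = codes[0]'hne' := by
      rw [PySem.List.pyGetD_eq_getElem codes 0 (by omega) (by omega)]; simp
    have hup : (codes = PySem.List.pyRange (PySem.List.pyGetD codes 0 0)
        (PySem.List.pyGetD codes 0 0 + (codes.length : Int)) 1) ↔ pvStep 1 codes := by
      rw [hc0]; exact pvRange_up_iff codes hne'
    have hdown : (codes = PySem.List.pyRange (PySem.List.pyGetD codes 0 0)
        (PySem.List.pyGetD codes 0 0 - (codes.length : Int)) (-1)) ↔ pvStep (-1) codes := by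
      rw [hc0]; exact pvRange_down_iff codes hne'
    have e1 : (((PySem.List.pyRange 0 ((cs.length : Int) - 1) 1).map
        (fun i => ((PySem.List.pyGetD cs (i + 1) default).toNat : Int)
                  - ((PySem.List.pyGetD cs i default).toNat : Int))).all
        (fun d => d == 1)) = decide (codes = PySem.List.pyRange (PySem.List.pyGetD codes 0 0)
          (PySem.List.pyGetD codes 0 0 + (codes.length : Int)) 1) := by
      rw [Bool.eq_iff_iff, decide_eq_true_eq, hup]
      exact pvDiffs_all_iff cs 1
    have e2 : (((PySem.List.pyRange 0 ((cs.length : Int) - 1) 1).map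
        (fun i => ((PySem.List.pyGetD cs (i + 1) default).toNat : Int)
                  - ((PySem.List.pyGetD cs i default).toNat : Int))).all
        (fun d => d == -1)) = decide (codes = PySem.List.pyRange (PySem.List.pyGetD codes 0 0)
          (PySem.List.pyGetD codes 0 0 - (codes.length : Int)) (-1)) := by
      rw [Bool.eq_iff_iff, decide_eq_true_eq, hdown]
      exact pvDiffs_all_iff cs (-1)
    show (if (((PySem.List.pyRange 0 ((cs.length : Int) - 1) 1).map
        (fun i => ((PySem.List.pyGetD cs (i + 1) default).toNat : Int)
                  - ((PySem.List.pyGetD cs i default).toNat : Int))).all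
        (fun d => d == 1)) = true then true
      else if (((PySem.List.pyRange 0 ((cs.length : Int) - 1) 1).map
        (fun i => ((PySem.List.pyGetD cs (i + 1) default).toNat : Int)
                  - ((PySem.List.pyGetD cs i default).toNat : Int))).all
        (fun d => d == -1)) = true then true else false)
      = (decide (codes = PySem.List.pyRange (PySem.List.pyGetD codes 0 0)
            (PySem.List.pyGetD codes 0 0 + (codes.length : Int)) 1)
         || decide (codes = PySem.List.pyRange (PySem.List.pyGetD codes 0 0)
            (PySem.List.pyGetD codes 0 0 - (codes.length : Int)) (-1)))
    rw [e1, e2]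
    exact pvIf_or _ _
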